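-- pv_equiv track=rewrite | github.com/A6y55/Differential-Privacy-Algorithm | rappor_lasso2.py | hash11
-- ===== SOURCE A (Python) =====
-- def hash11(num):
--     temp = [0] * 4
--     num = num * num
--     if num < 26:
--         return num + 2
--     for i in range(4):
--         k = num % 10
--         temp[i] = k
--         num = num // 23
--     return temp[2] * 10 + temp[1]
-- ===== SOURCE B (Python) =====
-- def hash11(num):
--     num = num * num
--     if num < 26:
--         return num + 2
--     q = num // 23
--     return int(str(q // 23)[-1] + str(q)[-1])
-- ===== Notes on version B (the rewrite author's own statement) =====
-- stated objective: alternative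
-- what changed: Replaces the 4-iteration modular-arithmetic digit loop and temp list with a string-based extraction: the two needed digits are read as the last characters of str(num*num//23) and str(num*num//23//23) and reassembled with int() on their two-character concatenation.
import Mathlib
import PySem

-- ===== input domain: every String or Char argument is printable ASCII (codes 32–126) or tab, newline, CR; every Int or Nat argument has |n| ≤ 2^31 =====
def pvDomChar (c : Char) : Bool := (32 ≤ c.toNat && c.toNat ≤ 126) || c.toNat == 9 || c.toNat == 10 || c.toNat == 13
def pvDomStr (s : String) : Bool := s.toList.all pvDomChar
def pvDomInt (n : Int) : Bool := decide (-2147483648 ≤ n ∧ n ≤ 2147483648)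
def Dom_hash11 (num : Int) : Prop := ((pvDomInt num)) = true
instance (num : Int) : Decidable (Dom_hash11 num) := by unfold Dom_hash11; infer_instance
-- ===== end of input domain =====

-- ===== PORT A =====
-- Port of A: the 4-iteration loop fills temp with base-10 digits while floor-dividing by 23.
def hash11 (num : Int) : Int :=
  let temp : List Int := [0, 0, 0, 0]
  let num := num * num
  if num < 26 then num + 2
  else
    let res := (PySem.List.pyRange 0 4 1).foldl
      (fun (s : List Int × Int) (i : Int) =>
        let k := PySem.Int.mod s.2 10
        (s.1.set i.toNat k, PySem.Int.floordiv s.2 23)) (temp, num)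
    (PySem.List.pyGetD res.1 2 0) * 10 + (PySem.List.pyGetD res.1 1 0)

-- ===== PORT B =====
-- B reads the two needed digits off the decimal string representations of num²//23 and
-- num²//23//23 (last character of str(...)) and glues them back with int() on the
-- concatenated two-character string — no digit loop, no temp list, no modular arithmetic.
def hash11_alt (num : Int) : Int :=
  let num := num * num
  if num < 26 then num + 2
  else
    let q := PySem.Int.floordiv num 23
    let c2 := (PySem.Str.pyGet? (PySem.Int.toStr (PySem.Int.floordiv q 23)) (-1)).getD ' '
    let c1 := (PySem.Str.pyGet? (PySem.Int.toStr q) (-1)).getD ' '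
    (PySem.Int.ofChars? [c2, c1]).getD 0

-- ===== PRECONDITION & SPEC =====
def Spec_hash11 (num : Int) (out : Int) : Prop := out = hash11_alt num
instance (num : Int) (out : Int) : Decidable (Spec_hash11 num out) := by unfold Spec_hash11; infer_instance

-- ===== CLAIM (what is proved, stated in full; the proofs are below) =====
def Claim_equal_hash11 : Prop := ∀ (num : Int), Dom_hash11 num → Spec_hash11 num (hash11 num)

-- ===== LEMMAS AND PROOFS =====

-- str(n) of a nonnegative n ends in the digit character of n % 10.
theorem toChars_getLast?_digit (n : Nat) :
    (PySem.Int.toChars (n : Int)).getLast? = some (Nat.digitChar (n % 10)) := by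
  have h : PySem.Int.toChars (n : Int) = Nat.toDigits 10 n := by
    simp [PySem.Int.toChars]
  rw [h, Nat.toDigits_eq_if (by norm_num)]
  split_ifs with hn
  · simp [Nat.mod_eq_of_lt hn]
  · simp

-- int("ab") on two digit characters reassembles the two-digit number.
theorem ofChars?_two_digits (a b : Nat) (ha : a < 10) (hb : b < 10) :
    PySem.Int.ofChars? [Nat.digitChar a, Nat.digitChar b] = some ((10 * a + b : Nat) : Int) := by
  interval_cases a <;> interval_cases b <;> decide

-- Python // 23 and % 10 agree with Nat division on a nonnegative argument.
theorem floordiv23_natCast (a : Nat) :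
    PySem.Int.floordiv (a : Int) 23 = ((a / 23 : Nat) : Int) := by
  rw [PySem.Int.floordiv, Int.fdiv_eq_ediv]
  simp

theorem mod10_natCast (a : Nat) :
    PySem.Int.mod (a : Int) 10 = ((a % 10 : Nat) : Int) := by
  rw [PySem.Int.mod, Int.fmod_eq_emod]
  simp

-- ===== VERDICT (by name: the statement is the Claim_ definition above) =====
theorem hash11_spec : Claim_equal_hash11 := by
  intro num _
  unfold Spec_hash11 hash11 hash11_alt
  by_cases h : num * num < 26
  · simp [h]
  · -- the squared value is a nonnegative integer ≥ 26
    obtain ⟨m, hm⟩ : ∃ m : Nat, num * num = (m : Int) :=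
      ⟨(num * num).toNat, (Int.toNat_of_nonneg (mul_self_nonneg num)).symm⟩
    simp only [hm] at h ⊢
    rw [if_neg h, if_neg h]
    -- A side: the four loop iterations, digit arithmetic turned into Nat arithmetic
    rw [show PySem.List.pyRange 0 4 1 = [0, 1, 2, 3] from rfl]
    simp only [List.foldl_cons, List.foldl_nil, mod10_natCast, floordiv23_natCast]
    -- B side: the last characters of the decimal strings
    have hlast : ∀ k : Nat,
        (PySem.Str.pyGet? (PySem.Int.toStr (k : Int)) (-1)).getD ' ' = Nat.digitChar (k % 10) := by
      intro k
      have : PySem.Str.pyGet? (PySem.Int.toStr (k : Int)) (-1)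
          = (PySem.Int.toChars (k : Int)).getLast? := by
        simp [PySem.Str.pyGet?_eq, PySem.Int.toList_toStr, PySem.List.pyGet?_neg_one]
      rw [this, toChars_getLast?_digit]
      rfl
    rw [hlast, hlast,
      ofChars?_two_digits _ _ (Nat.mod_lt _ (by norm_num)) (Nat.mod_lt _ (by norm_num))]
    -- index the temp list and finish with cast arithmetic
    norm_num [List.set, PySem.List.pyGetD, PySem.List.pyGet?, PySem.List.pyIdx?]
    simp [List.getElem_set]
    ring
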